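-- pv_equiv track=rewrite | github.com/DrMikeMaik/GOTCHA | text_noise_video_defense.py | build_cycle_schedule
-- ===== SOURCE A (Python) =====
-- def build_cycle_schedule(
--     groups: list[int],
--     active_count: int,
--     step_count: int,
-- ) -> list[tuple[int, ...]]:
--     if not groups:
--         return [tuple()] * step_count
--     if active_count >= len(groups):
--         return [tuple(groups)] * step_count
--
--     schedule: list[tuple[int, ...]] = []
--     for step_index in range(step_count):
--         start = step_index % len(groups)
--         active_groups = tuple(groups[(start + offset) % len(groups)] for offset in range(active_count))
--         schedule.append(active_groups)
--     return schedule
-- ===== SOURCE B (Python) =====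
-- def build_cycle_schedule(
--     groups: list[int],
--     active_count: int,
--     step_count: int,
-- ) -> list[tuple[int, ...]]:
--     if not groups:
--         return [tuple()] * step_count
--     if active_count >= len(groups):
--         return [tuple(groups)] * step_count
--
--     n = len(groups)
--     doubled = groups + groups
--     distinct = [tuple(doubled[s:s + max(active_count, 0)]) for s in range(n)]
--     return [distinct[i % n] for i in range(step_count)]
-- ===== Notes on version B (the rewrite author's own statement) =====
-- stated objective: alternative
-- what changed: B precomputes the len(groups) distinct cyclic windows once (as slices of groups+groups) and then indexes that table by step_index % len(groups), instead of rebuilding each tuple element-by-element with modular indexing at every step; the per-step work drops to a table lookup, trading O(len(groups)*active_count) precomputation.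
import Mathlib
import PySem

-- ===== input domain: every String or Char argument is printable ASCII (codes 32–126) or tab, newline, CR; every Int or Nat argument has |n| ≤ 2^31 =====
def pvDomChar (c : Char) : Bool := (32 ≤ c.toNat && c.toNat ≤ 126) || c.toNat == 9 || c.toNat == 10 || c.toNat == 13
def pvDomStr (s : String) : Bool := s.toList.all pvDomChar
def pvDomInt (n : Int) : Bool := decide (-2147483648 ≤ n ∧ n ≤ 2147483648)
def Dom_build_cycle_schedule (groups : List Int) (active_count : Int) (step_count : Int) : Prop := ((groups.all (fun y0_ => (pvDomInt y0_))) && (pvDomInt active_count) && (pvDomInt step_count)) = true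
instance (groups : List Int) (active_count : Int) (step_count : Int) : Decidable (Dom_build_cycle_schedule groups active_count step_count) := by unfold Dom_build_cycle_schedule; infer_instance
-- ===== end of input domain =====

-- B precomputes the len(groups) distinct cyclic windows once and indexes them by step % len(groups) (alternative algorithm).


-- ===== PORT A =====
def build_cycle_schedule (groups : List Int) (active_count : Int) (step_count : Int) : List (List Int) :=
  if groups = [] then List.replicate step_count.toNat []
  else if active_count ≥ (groups.length : Int) then List.replicate step_count.toNat groups
  else
    (PySem.List.pyRange 0 step_count 1).foldl
      (fun schedule step_index =>
        let start := PySem.Int.mod step_index (groups.length : Int)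
        schedule ++ [(PySem.List.pyRange 0 active_count 1).map
          (fun offset => PySem.List.pyGetD groups (PySem.Int.mod (start + offset) (groups.length : Int)) 0)])
      []

-- ===== PORT B =====
def build_cycle_schedule_alt (groups : List Int) (active_count : Int) (step_count : Int) : List (List Int) :=
  if groups = [] then List.replicate step_count.toNat []
  else if active_count ≥ (groups.length : Int) then List.replicate step_count.toNat groups
  else
    let n : Int := groups.length
    let doubled := groups ++ groups
    let distinct := (PySem.List.pyRange 0 n 1).map
      (fun s => PySem.List.slice doubled (some s) (some (s + max active_count 0)))
    (PySem.List.pyRange 0 step_count 1).map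
      (fun i => PySem.List.pyGetD distinct (PySem.Int.mod i n) [])

-- ===== PRECONDITION & SPEC =====
def Spec_build_cycle_schedule (groups : List Int) (active_count : Int) (step_count : Int) (out : List (List Int)) : Prop := out = build_cycle_schedule_alt groups active_count step_count
instance (groups : List Int) (active_count : Int) (step_count : Int) (out : List (List Int)) : Decidable (Spec_build_cycle_schedule groups active_count step_count out) := by unfold Spec_build_cycle_schedule; infer_instance

-- ===== CLAIM (what is proved, stated in full; the proofs are below) =====
def Claim_equal_build_cycle_schedule : Prop := ∀ (groups : List Int) (active_count : Int) (step_count : Int), Dom_build_cycle_schedule groups active_count step_count → Spec_build_cycle_schedule groups active_count step_count (build_cycle_schedule groups active_count step_count)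

-- ===== LEMMAS AND PROOFS =====

-- A's per-step tuple (modular gather starting at s) equals B's slice of the doubled list.
lemma window_eq (groups : List Int) (hg : groups ≠ []) (ac : Int) (hac : ac < (groups.length : Int))
    (s : Int) (hs0 : 0 ≤ s) (hsn : s < (groups.length : Int)) :
    (PySem.List.pyRange 0 ac 1).map
      (fun offset => PySem.List.pyGetD groups (PySem.Int.mod (s + offset) (groups.length : Int)) 0)
    = PySem.List.slice (groups ++ groups) (some s) (some (s + max ac 0)) := by
  have hn : 0 < (groups.length : Int) := by
    have := List.length_pos_iff.mpr hg; exact_mod_cast this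
  by_cases hac0 : ac ≤ 0
  · have hmax : max ac 0 = 0 := by omega
    rw [hmax, PySem.List.pyRange_one_eq_nil hac0,
        PySem.List.slice_toNat _ hs0 (by omega : (0:Int) ≤ s + 0)]
    simp
  · have hmax : max ac 0 = ac := by omega
    rw [hmax, PySem.List.slice_toNat _ hs0 (by omega : (0:Int) ≤ s + ac)]
    have hNs : s.toNat < groups.length := by omega
    have hNa : ac.toNat < groups.length := by omega
    apply List.ext_getElem
    · simp [PySem.List.length_pyRange_one]
      omega
    · intro k h1 h2
      simp only [List.getElem_map, PySem.List.getElem_pyRange_one, List.getElem_take,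
                 List.getElem_drop]
      have hk : (k : Int) < ac := by
        simp [PySem.List.length_pyRange_one] at h1; omega
      rw [List.getElem_append]
      have hx0 : (0:Int) ≤ s + (0 + (k:Int)) := by omega
      split
      · -- s.toNat + k < groups.length : no wrap
        rename_i hlt
        have hxlt : s + (0 + (k:Int)) < (groups.length : Int) := by omega
        rw [PySem.Int.mod_eq_emod_of_pos hn, Int.emod_eq_of_lt hx0 hxlt,
            PySem.List.pyGetD_eq_getElem _ _ hx0 hxlt]
        congr 1
        omega
      · -- wrapped: index s.toNat + k - groups.length
        rename_i hge
        have hxge : (groups.length : Int) ≤ s + (0 + (k:Int)) := by omega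
        have hsub0 : (0:Int) ≤ s + (0 + (k:Int)) - (groups.length : Int) := by omega
        have hsublt : s + (0 + (k:Int)) - (groups.length : Int) < (groups.length : Int) := by omega
        rw [PySem.Int.mod_eq_emod_of_pos hn, ← Int.sub_emod_right (s + (0 + (k:Int))) (groups.length : Int),
            Int.emod_eq_of_lt hsub0 hsublt,
            PySem.List.pyGetD_eq_getElem _ _ hsub0 hsublt]
        congr 1
        omega

-- ===== VERDICT (by name: the statement is the Claim_ definition above) =====
theorem build_cycle_schedule_spec : Claim_equal_build_cycle_schedule := by
  intro groups ac sc _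
  unfold Spec_build_cycle_schedule build_cycle_schedule build_cycle_schedule_alt
  by_cases hg : groups = []
  · simp [hg]
  · simp only [hg, if_false]
    by_cases hge : ac ≥ (groups.length : Int)
    · simp [hge]
    · simp only [hge, if_false]
      have hlen : 0 < (groups.length : Int) := by
        have := List.length_pos_iff.mpr hg; exact_mod_cast this
      rw [PySem.List.foldl_append_singleton_eq_map]
      apply List.map_congr_left
      intro i hi
      have hi0 : 0 ≤ i := (PySem.List.mem_pyRange_one.mp hi).1
      have hs0 : 0 ≤ PySem.Int.mod i (groups.length : Int) := PySem.Int.mod_nonneg i hlen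
      have hsn : PySem.Int.mod i (groups.length : Int) < (groups.length : Int) := PySem.Int.mod_lt i hlen
      rw [window_eq groups hg ac (lt_of_not_ge hge) _ hs0 hsn]
      -- RHS: look up the precomputed table
      have hlen2 : ((PySem.List.pyRange 0 (groups.length : Int) 1).map
          (fun s => PySem.List.slice (groups ++ groups) (some s) (some (s + max ac 0)))).length
          = groups.length := by
        simp [PySem.List.length_pyRange_one]
      rw [PySem.List.pyGetD_eq_getElem _ _ hs0 (by rw [hlen2]; exact_mod_cast hsn)]
      rw [List.getElem_map, PySem.List.getElem_pyRange_one]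
      congr 1 <;> simp [Int.toNat_of_nonneg hs0]
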